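-- pv_equiv track=rewrite | github.com/jai-jalah/adventofcode-2022 | day-8/part-1.py | is_visible_horizontally
-- ===== SOURCE A (Python) =====
-- def is_visible_horizontally(tree, tree_row, tree_index):
-- 	left_side_visible = True
-- 	right_side_visible = True
--
-- 	for validation_tree_index, validation_tree in enumerate(tree_row):
-- 		if left_side_visible and validation_tree_index < tree_index and validation_tree >= tree:
-- 			left_side_visible = False
-- 		elif right_side_visible and validation_tree_index > tree_index and validation_tree >= tree:
-- 			right_side_visible = False
--
-- 	if left_side_visible or right_side_visible:
-- 		return True
-- ===== SOURCE B (Python) =====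
-- def is_visible_horizontally(tree, tree_row, tree_index):
-- 	blockers = [i for i, t in enumerate(tree_row) if t >= tree]
-- 	if not blockers or blockers[0] >= tree_index or blockers[-1] <= tree_index:
-- 		return True
-- ===== Notes on version B (the rewrite author's own statement) =====
-- stated objective: alternative
-- what changed: Instead of A's flag-carrying pass over every tree, B first collects the indices of all blocking trees (height >= tree) and decides visibility from that list's extremes: visible iff there are no blockers, or the first blocker is at/after tree_index, or the last blocker is at/before tree_index; the implicit None return is kept.
import Mathlib
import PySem

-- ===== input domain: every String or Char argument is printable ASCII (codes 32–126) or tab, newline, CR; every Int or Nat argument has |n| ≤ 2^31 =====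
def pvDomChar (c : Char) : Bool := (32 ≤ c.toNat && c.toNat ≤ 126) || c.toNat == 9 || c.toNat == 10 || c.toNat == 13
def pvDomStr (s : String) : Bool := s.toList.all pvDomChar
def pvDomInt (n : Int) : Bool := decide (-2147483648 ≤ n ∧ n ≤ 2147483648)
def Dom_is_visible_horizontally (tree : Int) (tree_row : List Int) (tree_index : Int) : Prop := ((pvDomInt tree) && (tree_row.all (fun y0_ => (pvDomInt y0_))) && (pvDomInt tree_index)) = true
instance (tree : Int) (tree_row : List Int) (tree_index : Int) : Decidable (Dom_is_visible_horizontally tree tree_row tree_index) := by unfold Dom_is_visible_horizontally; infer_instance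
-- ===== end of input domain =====

-- B replaces A's flag-carrying pass over every tree by first collecting the indices of all
-- blocking trees (height >= tree) and deciding from that list's first and last element;
-- objective: alternative.

-- ===== PORT A =====
def is_visible_horizontally (tree : Int) (tree_row : List Int) (tree_index : Int) : Option Bool :=
  let st := (PySem.List.enumerate tree_row 0).foldl
    (fun (s : Bool × Bool) (p : Int × Int) =>
      if s.1 && decide (p.1 < tree_index) && decide (p.2 ≥ tree) then (false, s.2)
      else if s.2 && decide (p.1 > tree_index) && decide (p.2 ≥ tree) then (s.1, false)
      else s)
    (true, true)
  if st.1 || st.2 then some true else none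

-- ===== PORT B =====
-- blockers = [i for i, t in enumerate(tree_row) if t >= tree]
-- if not blockers or blockers[0] >= tree_index or blockers[-1] <= tree_index: return True
def is_visible_horizontally_alt (tree : Int) (tree_row : List Int) (tree_index : Int) : Option Bool :=
  let blockers := ((PySem.List.enumerate tree_row 0).filter (fun p => decide (p.2 ≥ tree))).map Prod.fst
  match blockers with
  | [] => some true
  | b :: bs =>
    if decide (b ≥ tree_index) || decide (List.getLastD bs b ≤ tree_index) then some true
    else none

-- ===== PRECONDITION & SPEC =====
def Spec_is_visible_horizontally (tree : Int) (tree_row : List Int) (tree_index : Int) (out : Option Bool) : Prop := out = is_visible_horizontally_alt tree tree_row tree_index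
instance (tree : Int) (tree_row : List Int) (tree_index : Int) (out : Option Bool) : Decidable (Spec_is_visible_horizontally tree tree_row tree_index out) := by unfold Spec_is_visible_horizontally; infer_instance

-- ===== CLAIM (what is proved, stated in full; the proofs are below) =====
def Claim_equal_is_visible_horizontally : Prop := ∀ (tree : Int) (tree_row : List Int) (tree_index : Int), Dom_is_visible_horizontally tree tree_row tree_index → Spec_is_visible_horizontally tree tree_row tree_index (is_visible_horizontally tree tree_row tree_index)

-- ===== LEMMAS AND PROOFS =====

-- A's loop, started at offset i, computes the two slice tests: the left flag survives iff all
-- elements at enumerate-indices < tree_index are < tree, and dually on the right.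
theorem pv_loop_eq (tree k : Int) (xs : List Int) :
    ∀ (i : Nat) (l r : Bool),
    (PySem.List.enumerate xs (i : Int)).foldl
      (fun (s : Bool × Bool) (p : Int × Int) =>
        if s.1 && decide (p.1 < k) && decide (p.2 ≥ tree) then (false, s.2)
        else if s.2 && decide (p.1 > k) && decide (p.2 ≥ tree) then (s.1, false)
        else s)
      (l, r)
    = (l && (xs.take (k - i).toNat).all (fun t => decide (t < tree)),
       r && (xs.drop (k + 1 - i).toNat).all (fun t => decide (t < tree))) := by
  induction xs with
  | nil => simp [PySem.List.enumerate_nil]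
  | cons x xs ih =>
    intro i l r
    rw [PySem.List.enumerate_cons, List.foldl_cons]
    by_cases hx : tree ≤ x
    · have hx' : decide (x < tree) = false := by simp; omega
      by_cases hi : (i : Int) < k
      · have h1 : (k - (i : Int)).toNat = (k - ((i : Int) + 1)).toNat + 1 := by omega
        have h2 : (k + 1 - (i : Int)).toNat = (k + 1 - ((i : Int) + 1)).toNat + 1 := by omega
        have hng : ¬ ((i : Int) > k) := by omega
        have hrec := ih (i + 1) false r
        push_cast at hrec
        simp only [gt_iff_lt, ge_iff_le] at hrec
        simp only [gt_iff_lt, ge_iff_le, hi, hng, hx, decide_true, decide_false, Bool.and_true,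
          Bool.and_false, Bool.false_and]
        cases l
        · simp only [Bool.false_eq_true, if_false]
          rw [hrec]
          simp [h1, h2, List.take_succ_cons, List.drop_succ_cons, hx']
        · simp only [if_true]
          rw [hrec]
          simp [h1, h2, List.take_succ_cons, List.drop_succ_cons, hx']
      · by_cases hgt : k < (i : Int)
        · have h1 : (k - (i : Int)).toNat = 0 := by omega
          have h1' : (k - ((i : Int) + 1)).toNat = 0 := by omega
          have h2 : (k + 1 - (i : Int)).toNat = 0 := by omega
          have h2' : (k + 1 - ((i : Int) + 1)).toNat = 0 := by omega
          have hni : ¬ ((i : Int) < k) := by omega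
          have hrecT := ih (i + 1) l false
          push_cast at hrecT
          simp only [gt_iff_lt, ge_iff_le] at hrecT
          simp only [gt_iff_lt, ge_iff_le, hni, hgt, hx, decide_true, decide_false, Bool.and_true,
            Bool.and_false, Bool.false_and, Bool.false_eq_true, if_false]
          cases r
          · simp only [Bool.false_eq_true, if_false]
            rw [hrecT]
            simp [h1, h1', h2, h2', hx']
          · simp only [if_true]
            rw [hrecT]
            simp [h1, h1', h2, h2', hx']
        · have h1 : (k - (i : Int)).toNat = 0 := by omega
          have h1' : (k - ((i : Int) + 1)).toNat = 0 := by omega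
          have h2 : (k + 1 - (i : Int)).toNat = 1 := by omega
          have h2' : (k + 1 - ((i : Int) + 1)).toNat = 0 := by omega
          have hrec := ih (i + 1) l r
          push_cast at hrec
          simp only [gt_iff_lt, ge_iff_le] at hrec
          simp only [gt_iff_lt, ge_iff_le, hi, hgt, decide_false, Bool.and_true, Bool.and_false,
            Bool.false_and, Bool.false_eq_true, if_false]
          rw [hrec]
          simp [h1, h1', h2, h2']
    · have hx' : decide (x < tree) = true := by simp; omega
      have hxf : decide (tree ≤ x) = false := by simp; omega
      have hrec := ih (i + 1) l r
      push_cast at hrec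
      simp only [gt_iff_lt, ge_iff_le] at hrec
      simp only [ge_iff_le, hxf, Bool.and_false, Bool.false_eq_true, if_false]
      rw [hrec]
      by_cases hi : (i : Int) < k
      · have h1 : (k - (i : Int)).toNat = (k - ((i : Int) + 1)).toNat + 1 := by omega
        have h2 : (k + 1 - (i : Int)).toNat = (k + 1 - ((i : Int) + 1)).toNat + 1 := by omega
        simp [h1, h2, List.take_succ_cons, List.drop_succ_cons, hx']
      · by_cases hgt : k < (i : Int)
        · have h1 : (k - (i : Int)).toNat = 0 := by omega
          have h1' : (k - ((i : Int) + 1)).toNat = 0 := by omega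
          have h2 : (k + 1 - (i : Int)).toNat = 0 := by omega
          have h2' : (k + 1 - ((i : Int) + 1)).toNat = 0 := by omega
          simp [h1, h1', h2, h2', hx']
        · have h1 : (k - (i : Int)).toNat = 0 := by omega
          have h1' : (k - ((i : Int) + 1)).toNat = 0 := by omega
          have h2 : (k + 1 - (i : Int)).toNat = 1 := by omega
          have h2' : (k + 1 - ((i : Int) + 1)).toNat = 0 := by omega
          simp [h1, h1', h2, h2', hx']

-- B-side proof helpers: the blocker-index list and the two extremal tests.
def pvBl (tree : Int) (xs : List Int) (i : Int) : List Int :=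
  ((PySem.List.enumerate xs i).filter (fun p => decide (p.2 ≥ tree))).map Prod.fst

def pvL (k : Int) : List Int → Bool
  | [] => true
  | b :: _ => decide (k ≤ b)

def pvR (k : Int) : List Int → Bool
  | [] => true
  | b :: bs => decide (List.getLastD bs b ≤ k)

theorem pvBl_cons (tree x : Int) (xs : List Int) (i : Int) :
    pvBl tree (x :: xs) i =
      if tree ≤ x then i :: pvBl tree xs (i + 1) else pvBl tree xs (i + 1) := by
  simp only [pvBl, PySem.List.enumerate_cons, List.filter_cons]
  by_cases h : tree ≤ x
  · simp [h]
  · simp [h]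

theorem pvBl_nil_iff (tree : Int) (xs : List Int) (i : Int) :
    pvBl tree xs i = [] ↔ xs.all (fun t => decide (t < tree)) = true := by
  induction xs generalizing i with
  | nil => simp [pvBl, PySem.List.enumerate_nil]
  | cons x xs ih =>
    rw [pvBl_cons]
    by_cases h : tree ≤ x
    · simp only [h, if_true]
      constructor
      · intro hc; cases hc
      · intro hall
        simp only [List.all_cons, Bool.and_eq_true, decide_eq_true_eq] at hall
        omega
    · simp only [h, if_false, List.all_cons, Bool.and_eq_true, decide_eq_true_eq]
      rw [ih (i + 1)]
      constructor
      · intro hall; exact ⟨by omega, hall⟩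
      · intro ⟨_, hall⟩; exact hall

theorem pvR_cons_cons (k b c : Int) (cs : List Int) :
    pvR k (b :: c :: cs) = pvR k (c :: cs) := by
  simp only [pvR, List.getLastD_cons]

theorem pvL_eq (tree k : Int) (xs : List Int) :
    ∀ (i : Nat), pvL k (pvBl tree xs (i : Int)) =
      (xs.take (k - i).toNat).all (fun t => decide (t < tree)) := by
  induction xs with
  | nil => simp [pvBl, PySem.List.enumerate_nil, pvL]
  | cons x xs ih =>
    intro i
    rw [pvBl_cons]
    by_cases hx : tree ≤ x
    · have hx' : decide (x < tree) = false := by simp; omega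
      simp only [hx, if_true, pvL]
      by_cases hi : (i : Int) < k
      · have h1 : (k - (i : Int)).toNat = (k - ((i : Int) + 1)).toNat + 1 := by omega
        have hkle : decide (k ≤ (i : Int)) = false := by simp; omega
        simp [h1, List.take_succ_cons, hx', hkle]
      · have h1 : (k - (i : Int)).toNat = 0 := by omega
        have hkle : decide (k ≤ (i : Int)) = true := by simp; omega
        simp [h1, hkle]
    · have hx' : decide (x < tree) = true := by simp; omega
      simp only [hx, if_false]
      have hrec := ih (i + 1)
      push_cast at hrec
      by_cases hi : (i : Int) < k
      · have h1 : (k - (i : Int)).toNat = (k - ((i : Int) + 1)).toNat + 1 := by omega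
        rw [hrec] at *
        simp [h1, List.take_succ_cons, hx', hrec]
      · have h1 : (k - (i : Int)).toNat = 0 := by omega
        have h1' : (k - ((i : Int) + 1)).toNat = 0 := by omega
        rw [hrec]
        simp [h1, h1']

theorem pvR_eq (tree k : Int) (xs : List Int) :
    ∀ (i : Nat), pvR k (pvBl tree xs (i : Int)) =
      (xs.drop (k + 1 - i).toNat).all (fun t => decide (t < tree)) := by
  induction xs with
  | nil => simp [pvBl, PySem.List.enumerate_nil, pvR]
  | cons x xs ih =>
    intro i
    rw [pvBl_cons]
    have hrec := ih (i + 1)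
    push_cast at hrec
    by_cases hx : tree ≤ x
    · have hx' : decide (x < tree) = false := by simp; omega
      simp only [hx, if_true]
      by_cases hi : (i : Int) ≤ k
      · -- drop still skips this element
        have h2 : (k + 1 - (i : Int)).toNat = (k + 1 - ((i : Int) + 1)).toNat + 1 := by omega
        rw [h2, List.drop_succ_cons, ← hrec]
        cases hbl : pvBl tree xs ((i : Int) + 1) with
        | nil => simp [pvR]; omega
        | cons c cs => rw [pvR_cons_cons]
      · -- the current blocker is right of k: the drop covers x, both sides false
        have h2 : (k + 1 - (i : Int)).toNat = 0 := by omega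
        have h2' : (k + 1 - ((i : Int) + 1)).toNat = 0 := by omega
        rw [h2, List.drop_zero, List.all_cons, hx', Bool.false_and]
        cases hbl : pvBl tree xs ((i : Int) + 1) with
        | nil =>
          simp only [pvR, List.getLastD_nil]
          simp; omega
        | cons c cs =>
          rw [pvR_cons_cons, ← hbl, hrec, h2', List.drop_zero]
          have : ¬ (pvBl tree xs ((i : Int) + 1) = []) := by rw [hbl]; simp
          rw [pvBl_nil_iff] at this
          exact (Bool.not_eq_true _).mp this
    · have hx' : decide (x < tree) = true := by simp; omega
      simp only [hx, if_false]
      rw [hrec]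
      by_cases hi : (i : Int) ≤ k
      · have h2 : (k + 1 - (i : Int)).toNat = (k + 1 - ((i : Int) + 1)).toNat + 1 := by omega
        simp [h2, List.drop_succ_cons]
      · have h2 : (k + 1 - (i : Int)).toNat = 0 := by omega
        have h2' : (k + 1 - ((i : Int) + 1)).toNat = 0 := by omega
        rw [h2, h2', List.drop_zero, List.drop_zero]
        simp [hx']

-- B computes exactly "pvL || pvR" of the blocker list.
theorem pv_alt_eq (tree : Int) (xs : List Int) (k : Int) :
    is_visible_horizontally_alt tree xs k =
      (if pvL k (pvBl tree xs 0) || pvR k (pvBl tree xs 0) then some true else none) := by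
  unfold is_visible_horizontally_alt
  show (match pvBl tree xs 0 with
        | [] => some true
        | b :: bs => if decide (b ≥ k) || decide (List.getLastD bs b ≤ k) then some true else none)
      = _
  cases pvBl tree xs 0 with
  | nil => simp [pvL, pvR]
  | cons b bs => simp [pvL, pvR, ge_iff_le]

-- ===== VERDICT (by name: the statement is the Claim_ definition above) =====
theorem is_visible_horizontally_spec : Claim_equal_is_visible_horizontally := by
  intro tree row k _
  unfold Spec_is_visible_horizontally is_visible_horizontally
  rw [pv_alt_eq]
  have hloop := pv_loop_eq tree k row 0 true true
  push_cast at hloop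
  rw [hloop]
  have hl := pvL_eq tree k row 0
  have hr := pvR_eq tree k row 0
  push_cast at hl hr
  rw [hl, hr]
  simp
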